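-- pv_equiv track=rewrite | github.com/atrep123/shumilek | projects/shumilek_hive/tests/test_main.py | _apply_cap
-- ===== SOURCE A (Python) =====
-- def _apply_cap(tasks: list[dict]) -> list[dict]:
--     """Replicate the improved cap logic."""
--     if len(tasks) > 100:
--         _active = ["pending", "running"]
--         tasks = [
--             t for t in tasks if t["status"] in _active
--         ] + [
--             t for t in tasks if t["status"] not in _active
--         ][-50:]
--     return tasks
-- ===== SOURCE B (Python) =====
-- def _apply_cap(tasks: list[dict]) -> list[dict]:
--     """Cap via a stable sort: sorting by the boolean 'is inactive' key stably
--     partitions the list into actives followed by inactives (original order kept);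
--     then splice out all but the last 50 inactives."""
--     if len(tasks) > 100:
--         s = sorted(tasks, key=lambda t: t["status"] not in ("pending", "running"))
--         n_inactive = sum(1 for t in tasks if t["status"] not in ("pending", "running"))
--         if n_inactive > 50:
--             del s[len(s) - n_inactive : len(s) - 50]
--         tasks = s
--     return tasks
-- ===== Notes on version B (the rewrite author's own statement) =====
-- stated objective: alternative
-- what changed: Instead of A's two list comprehensions plus a [-50:] slice, B stably sorts the list by the boolean 'is inactive' key (a stable sort with a two-valued key is exactly a stable partition), counts the inactive tasks, and splices out the middle block of inactive tasks beyond the last 50; it trades A's linear two-pass filtering for a sort-based partition.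
import Mathlib
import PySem

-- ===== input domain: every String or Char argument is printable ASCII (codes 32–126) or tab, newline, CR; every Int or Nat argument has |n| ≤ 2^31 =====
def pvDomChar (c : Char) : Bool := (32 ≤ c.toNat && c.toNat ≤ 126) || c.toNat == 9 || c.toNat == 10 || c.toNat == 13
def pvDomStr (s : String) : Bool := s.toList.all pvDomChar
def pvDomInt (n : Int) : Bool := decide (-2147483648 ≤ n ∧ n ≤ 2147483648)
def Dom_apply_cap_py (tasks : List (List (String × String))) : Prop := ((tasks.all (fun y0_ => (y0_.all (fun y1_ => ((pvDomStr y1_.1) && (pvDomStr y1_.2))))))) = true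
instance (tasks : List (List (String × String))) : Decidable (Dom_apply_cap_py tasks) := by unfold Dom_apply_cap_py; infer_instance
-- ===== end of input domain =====

-- B caps by a STABLE SORT on the boolean 'is inactive' key (a stable partition)
-- and splices out the inactive middle block, instead of A's two comprehensions
-- plus a [-50:] slice (objective: alternative).

-- shared helper: t["status"] (value of the dict lookup; "" is never read under Pre_)
def pvStatus (t : List (String × String)) : String :=
  ((PySem.Dict.ofList t).get? "status").getD ""

-- ===== PORT A =====
def apply_cap_py (tasks : List (List (String × String))) : List (List (String × String)) :=
  if tasks.length > 100 then
    let _active : List String := ["pending", "running"]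
    (tasks.filter (fun t => _active.contains (pvStatus t))) ++
      PySem.List.slice (tasks.filter (fun t => !(_active.contains (pvStatus t)))) (some (-50)) none
  else
    tasks

-- ===== PORT B =====
def pvIsActive (t : List (String × String)) : Bool :=
  pvStatus t == "pending" || pvStatus t == "running"

-- Python's key is the bool `t["status"] not in (...)`; sorting bools compares
-- them as the ints False = 0 < True = 1, ported as a 0/1 Nat key.
def pvKey (t : List (String × String)) : Nat := if pvIsActive t then 0 else 1

def apply_cap_py_alt (tasks : List (List (String × String))) : List (List (String × String)) :=
  if tasks.length > 100 then
    let s := PySem.List.sorted tasks pvKey false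
    -- sum(1 for t in tasks if t["status"] not in (...)): a nonnegative count, ported as Nat
    let nInactive := tasks.foldl (fun n t => if !pvIsActive t then n + 1 else n) 0
    if nInactive > 50 then
      -- del s[len(s)-n_inactive : len(s)-50]: exact splice, both bounds in [0, len(s)]
      s.take (s.length - nInactive) ++ s.drop (s.length - 50)
    else s
  else tasks

-- ===== PRECONDITION & SPEC =====
-- Pre_ excludes exactly the inputs where A raises KeyError: more than 100 tasks
-- and some task without a "status" key (B raises there too).
def Pre_apply_cap_py (tasks : List (List (String × String))) : Prop :=
  tasks.length ≤ 100 ∨ ∀ t ∈ tasks, "status" ∈ t.map Prod.fst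
instance (tasks : List (List (String × String))) : Decidable (Pre_apply_cap_py tasks) := by
  unfold Pre_apply_cap_py; infer_instance

def pvWitness_apply_cap_py : (List (List (String × String))) := ([[("status", "done")]])

def Spec_apply_cap_py (tasks : List (List (String × String))) (out : List (List (String × String))) : Prop := out = apply_cap_py_alt tasks
instance (tasks : List (List (String × String))) (out : List (List (String × String))) : Decidable (Spec_apply_cap_py tasks out) := by unfold Spec_apply_cap_py; infer_instance

-- ===== CLAIM (what is proved, stated in full; the proofs are below) =====
def Claim_equal_apply_cap_py : Prop := ∀ (tasks : List (List (String × String))), Dom_apply_cap_py tasks → Pre_apply_cap_py tasks → Spec_apply_cap_py tasks (apply_cap_py tasks)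

-- ===== LEMMAS AND PROOFS =====

-- A's membership test agrees with pvIsActive
theorem pvContains_eq (t : List (String × String)) :
    (["pending", "running"] : List String).contains (pvStatus t) = pvIsActive t := by
  simp only [pvIsActive]
  rw [show (pvStatus t == "pending") = decide (pvStatus t = "pending") from by
        by_cases h : pvStatus t = "pending" <;> simp [h],
      show (pvStatus t == "running") = decide (pvStatus t = "running") from by
        by_cases h : pvStatus t = "running" <;> simp [h]]
  simp

theorem pvFilter_act (tasks : List (List (String × String))) :
    tasks.filter (fun t => (["pending", "running"] : List String).contains (pvStatus t))
      = tasks.filter (fun t => pvIsActive t) :=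
  List.filter_congr (fun t _ => by rw [pvContains_eq])

theorem pvFilter_inact (tasks : List (List (String × String))) :
    tasks.filter (fun t => !((["pending", "running"] : List String).contains (pvStatus t)))
      = tasks.filter (fun t => !pvIsActive t) :=
  List.filter_congr (fun t _ => by rw [pvContains_eq])

-- inserting an ACTIVE task goes right after the active block (stability)
theorem pvInsert_active (x : List (String × String)) (hx : pvIsActive x = true)
    (as bs : List (List (String × String)))
    (ha : ∀ a ∈ as, pvIsActive a = true) (hb : ∀ b ∈ bs, pvIsActive b = false) :
    PySem.List.insertBy (fun a b => decide (pvKey a < pvKey b)) x (as ++ bs)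
      = as ++ x :: bs := by
  induction as with
  | nil =>
    cases bs with
    | nil => simp [PySem.List.insertBy]
    | cons b bs =>
      have hbb := hb b (List.mem_cons_self ..)
      simp [PySem.List.insertBy, pvKey, hx, hbb]
  | cons a as ih =>
    have haa := ha a (List.mem_cons_self ..)
    simp only [List.cons_append, PySem.List.insertBy]
    rw [if_neg (by simp [pvKey, hx, haa])]
    rw [ih (fun a h => ha a (List.mem_cons_of_mem _ h))]

-- inserting an INACTIVE task appends at the end (key 1 is maximal)
theorem pvInsert_inactive (x : List (String × String)) (hx : pvIsActive x = false)
    (ys : List (List (String × String))) :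
    PySem.List.insertBy (fun a b => decide (pvKey a < pvKey b)) x ys = ys ++ [x] := by
  apply PySem.List.insertBy_of_forall_not_before
  intro y _
  simp [pvKey, hx]
  split <;> simp

-- stable sort by the 0/1 key = stable partition: actives then inactives
theorem pvFold_sort (ts as bs : List (List (String × String)))
    (ha : ∀ a ∈ as, pvIsActive a = true) (hb : ∀ b ∈ bs, pvIsActive b = false) :
    ts.foldl (fun acc x => PySem.List.insertBy (fun a b => decide (pvKey a < pvKey b)) x acc)
        (as ++ bs)
      = (as ++ ts.filter (fun t => pvIsActive t)) ++ (bs ++ ts.filter (fun t => !pvIsActive t)) := by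
  induction ts generalizing as bs with
  | nil => simp
  | cons t ts ih =>
    by_cases ht : pvIsActive t
    · simp only [List.foldl_cons]
      rw [pvInsert_active t ht as bs ha hb]
      have := ih (as ++ [t]) bs
        (by intro a h; rcases List.mem_append.1 h with h | h
            · exact ha a h
            · simp at h; simpa [h] using ht) hb
      rw [show as ++ t :: bs = (as ++ [t]) ++ bs by simp] at *
      rw [this]
      simp [ht]
    · simp only [List.foldl_cons]
      rw [pvInsert_inactive t (by simpa using ht) (as ++ bs)]
      have := ih as (bs ++ [t]) ha
        (by intro b h; rcases List.mem_append.1 h with h | h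
            · exact hb b h
            · simp at h; simpa [h] using ht)
      rw [List.append_assoc, this]
      simp [ht]

theorem pvSorted_partition (tasks : List (List (String × String))) :
    PySem.List.sorted tasks pvKey false
      = tasks.filter (fun t => pvIsActive t) ++ tasks.filter (fun t => !pvIsActive t) := by
  rw [PySem.List.sorted_eq_foldl_insertBy]
  simpa using pvFold_sort tasks [] [] (by simp) (by simp)

-- the inactive-count fold is the length of the inactive filter
theorem pvCount_foldl (tasks : List (List (String × String))) (n : Nat) :
    tasks.foldl (fun n t => if !pvIsActive t then n + 1 else n) n
      = n + (tasks.filter (fun t => !pvIsActive t)).length := by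
  induction tasks generalizing n with
  | nil => simp
  | cons t ts ih =>
    rw [List.foldl_cons, List.filter_cons, ih]
    by_cases ht : pvIsActive t
    · simp [ht]
    · simp [ht]
      omega

-- ===== VERDICT (by name: the statement is the Claim_ definition above) =====
theorem apply_cap_py_spec : Claim_equal_apply_cap_py := by
  intro tasks _ _
  unfold Spec_apply_cap_py
  by_cases h : tasks.length > 100
  · simp only [apply_cap_py, apply_cap_py_alt, if_pos h]
    rw [pvFilter_act, pvFilter_inact, pvSorted_partition, pvCount_foldl]
    set act := tasks.filter (fun t => pvIsActive t) with hact
    set inact := tasks.filter (fun t => !pvIsActive t) with hinact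
    simp only [Nat.zero_add]
    rw [PySem.List.slice_from_neg_ofNat _ 50 (by norm_num)]
    by_cases h50 : inact.length > 50
    · rw [if_pos h50]
      have hlen : (act ++ inact).length = act.length + inact.length := List.length_append
      rw [show (act ++ inact).length - inact.length = act.length by omega]
      rw [List.take_left]
      rw [show (act ++ inact).length - 50 = act.length + (inact.length - 50) by omega]
      rw [List.drop_append, List.drop_eq_nil_of_le (Nat.le_add_right _ _),
        Nat.add_sub_cancel_left, List.nil_append]
    · rw [if_neg h50]
      rw [show inact.length - 50 = 0 by omega, List.drop_zero]
  · simp only [apply_cap_py, apply_cap_py_alt, if_neg h]
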